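-- pv_equiv track=rewrite | github.com/code-enig/Python | 분류/스택과 큐/110옮기기.py | solution
-- ===== SOURCE A (Python) =====
-- def solution(s):
--     answer = []
--     for e in s:
--         x=''
--         if len(e) >= 3:
--             stack = ''
--             ooz = 0
--             for oz in e:
--                 if len(stack) >= 2 and stack[-2:] == '11' and oz =='0':
--                     ooz += 1
--                     stack = stack[:-2]
--                 else:
--                     stack = stack + oz
--             if stack:
--                 for i,elem in enumerate(reversed(stack)):
--                     if elem == '0':
--                         x = stack[:len(stack)-i] +'110'*ooz+ stack[len(stack)-i:]
--                         break
--                 else: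
--                     x = '110'*ooz + stack
--             else:
--                 x = '110'*ooz
--         else:
--             x = e
--         answer.append(x)
--     return answer
-- ===== SOURCE B (Python) =====
-- def solution(s):
--     out = []
--     for e in s:
--         if len(e) < 3:
--             out.append(e)
--             continue
--         r = e
--         i = r.find('110')
--         while i != -1:
--             r = r[:i] + r[i + 3:]
--             i = r.find('110')
--         ooz = (len(e) - len(r)) // 3
--         j = r.rfind('0')
--         out.append(r[:j + 1] + '110' * ooz + r[j + 1:])
--     return out
-- ===== Notes on version B (the rewrite author's own statement) =====
-- stated objective: simpler
-- what changed: A's manual character stack (with pop-counting) plus a reversed-enumerate rescan with a for/else is replaced by a find-and-delete rewriting loop on the '110' pattern (confluent, so it yields the same normal form), with the removal count recovered from the length difference and the splice point taken directly from rfind('0').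
import Mathlib
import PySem

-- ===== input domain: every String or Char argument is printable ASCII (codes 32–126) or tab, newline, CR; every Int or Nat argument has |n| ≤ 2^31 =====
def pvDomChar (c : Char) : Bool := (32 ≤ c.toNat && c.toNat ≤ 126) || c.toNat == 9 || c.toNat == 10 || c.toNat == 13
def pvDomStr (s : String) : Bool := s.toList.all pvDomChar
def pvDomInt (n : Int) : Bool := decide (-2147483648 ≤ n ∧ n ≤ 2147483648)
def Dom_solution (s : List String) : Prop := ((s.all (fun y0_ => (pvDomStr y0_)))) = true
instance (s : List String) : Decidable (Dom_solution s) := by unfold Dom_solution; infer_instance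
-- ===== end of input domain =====

-- B replaces A's manual stack fold and reversed-enumerate rescan by a find/delete rewriting loop
-- with the removal count recovered from the length difference and the splice point from rfind('0');
-- objective: simpler, same result proved equal.

-- ===== PORT A =====

-- A's inner loop body: pop '11' off the stack on a '0' (counting), else push.
def pvStep (p : List Char × Int) (oz : Char) : List Char × Int :=
  if 2 ≤ p.1.length ∧ PySem.List.slice p.1 (some (-2)) none = ['1', '1'] ∧ oz = '0' then
    (PySem.List.slice p.1 none (some (-2)), p.2 + 1)
  else (p.1 ++ [oz], p.2)

-- A's `for i,elem in enumerate(reversed(stack)) … break / else` loop.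
def pvScan (stack : List Char) (ooz : Int) : List (Int × Char) → List Char
  | [] => PySem.List.pyRepeat ['1', '1', '0'] ooz ++ stack
  | (i, elem) :: rest =>
    if elem = '0' then
      PySem.List.slice stack none (some ((stack.length : Int) - i)) ++
        PySem.List.pyRepeat ['1', '1', '0'] ooz ++
        PySem.List.slice stack (some ((stack.length : Int) - i)) none
    else pvScan stack ooz rest

-- the body of A's outer `for e in s` loop (computes x for one string e)
def pvAOne (e : List Char) : List Char :=
  if 3 ≤ e.length then
    let st := e.foldl pvStep ([], 0)
    if st.1 ≠ [] then pvScan st.1 st.2 (PySem.List.enumerate st.1.reverse 0)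
    else PySem.List.pyRepeat ['1', '1', '0'] st.2
  else e

def solution (s : List String) : List String :=
  s.foldl (fun answer e => answer ++ [String.ofList (pvAOne e.toList)]) []

-- ===== PORT B =====

-- Source B's `while i != -1` rewriting loop: delete the first '110', re-find.
def pvReduce (r : List Char) : List Char :=
  let i := PySem.Chars.find r ['1', '1', '0']
  if h : i = -1 then r
  else
    pvReduce (PySem.List.slice r none (some i) ++ PySem.List.slice r (some (i + 3)) none)
termination_by r.length
decreasing_by
  · have h0 : (0:Int) ≤ PySem.Chars.find r ['1','1','0'] := by
      have := PySem.Chars.neg_one_le_find (s := r) (sub := ['1','1','0'])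
      omega
    have hsp := (PySem.Chars.find_spec (s := r) (sub := ['1','1','0']) h0).1
    have hlen : (PySem.Chars.find r ['1','1','0']).toNat + 3 ≤ r.length := by
      have := hsp.length_le
      simp at this
      omega
    rw [PySem.List.slice_to r h0,
      PySem.List.slice_from r (show (0:Int) ≤ PySem.Chars.find r ['1','1','0'] + 3 by omega)]
    simp only [List.length_append, List.length_take, List.length_drop]
    have : ((PySem.Chars.find r ['1','1','0']) + 3).toNat
        = (PySem.Chars.find r ['1','1','0']).toNat + 3 := by omega
    omega

-- the body of Source B's loop over s (computes the appended string for one e)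
def pvBOne (e : List Char) : List Char :=
  if e.length < 3 then e
  else
    let r := pvReduce e
    let ooz : Int := PySem.Int.floordiv ((e.length : Int) - (r.length : Int)) 3
    let j := PySem.Chars.rfind r ['0']
    PySem.List.slice r none (some (j + 1)) ++ PySem.List.pyRepeat ['1', '1', '0'] ooz ++
      PySem.List.slice r (some (j + 1)) none

def solution_alt (s : List String) : List String :=
  s.foldl (fun out e => out ++ [String.ofList (pvBOne e.toList)]) []

-- ===== PRECONDITION & SPEC =====
def Spec_solution (s : List String) (out : List String) : Prop := out = solution_alt s
instance (s : List String) (out : List String) : Decidable (Spec_solution s out) := by unfold Spec_solution; infer_instance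

-- ===== CLAIM (what is proved, stated in full; the proofs are below) =====
def Claim_equal_solution : Prop := ∀ (s : List String), Dom_solution s → Spec_solution s (solution s)

-- ===== LEMMAS AND PROOFS =====

-- The first coordinate of A's fold does not depend on the running count.
theorem pvStep_fst_indep (w : List Char) (p : List Char × Int) (c' : Int) :
    (w.foldl pvStep p).1 = (w.foldl pvStep (p.1, c')).1 := by
  obtain ⟨st, c⟩ := p
  induction w generalizing st c c' with
  | nil => rfl
  | cons oz w ih =>
    simp only [List.foldl_cons, pvStep]
    split_ifs <;> exact ih _ _ _

-- Length/count invariant of A's fold: every pop trades 3 length units for one count.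
theorem pvStep_len (w : List Char) (st : List Char) (c : Int) :
    3 * (w.foldl pvStep (st, c)).2 + ((w.foldl pvStep (st, c)).1.length : Int)
      = 3 * c + st.length + w.length := by
  induction w generalizing st c with
  | nil => simp
  | cons oz w ih =>
    simp only [List.foldl_cons, pvStep]
    split_ifs with h
    · have h2 : 2 ≤ st.length := h.1
      rw [PySem.List.slice_to_neg_ofNat st 2 (by omega)]
      have hIH := ih (st.take (st.length - 2)) (c + 1)
      simp only [List.length_take, List.length_cons] at hIH ⊢
      omega
    · have hIH := ih (st ++ [oz]) c
      simp only [List.length_append, List.length_cons, List.length_nil] at hIH ⊢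
      omega

-- If the whole remaining input is '110'-free, A's fold just copies it onto the stack.
theorem pvStep_free_id (w : List Char) (st : List Char) (c : Int)
    (hfree : ¬ ['1', '1', '0'] <:+: st ++ w) :
    w.foldl pvStep (st, c) = (st ++ w, c) := by
  induction w generalizing st with
  | nil => simp
  | cons oz w ih =>
    simp only [List.foldl_cons, pvStep]
    have hcond : ¬ (2 ≤ st.length ∧ PySem.List.slice st (some (-2)) none = ['1', '1'] ∧ oz = '0') := by
      rintro ⟨h2, hsl, hz⟩
      rw [PySem.List.slice_from_neg_ofNat st 2 (by omega)] at hsl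
      apply hfree
      refine ⟨st.take (st.length - 2), w, ?_⟩
      subst hz
      calc st.take (st.length - 2) ++ ['1', '1', '0'] ++ w
          = (st.take (st.length - 2) ++ ['1', '1']) ++ '0' :: w := by simp
        _ = (st.take (st.length - 2) ++ st.drop (st.length - 2)) ++ '0' :: w := by rw [hsl]
        _ = st ++ '0' :: w := by rw [List.take_append_drop]
    rw [if_neg hcond, ih (st ++ [oz]) (by simpa using hfree)]
    simp

-- Feeding '1','1','0' from any state returns to the same stack with the count bumped.
theorem pvStep_110 (v : List Char) (p : List Char × Int) :
    (['1', '1', '0'] ++ v).foldl pvStep p = v.foldl pvStep (p.1, p.2 + 1) := by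
  obtain ⟨st, c⟩ := p
  have h1 : pvStep (st, c) '1' = (st ++ ['1'], c) := by
    simp [pvStep]
  have h3 : pvStep (st ++ ['1', '1'], c) '0' = (st, c + 1) := by
    rw [pvStep]
    rw [if_pos ?_]
    · rw [PySem.List.slice_to_neg_ofNat (st ++ ['1','1']) 2 (by omega)]
      simp
    · refine ⟨by simp, ?_, rfl⟩
      rw [PySem.List.slice_from_neg_ofNat (st ++ ['1','1']) 2 (by omega)]
      simp
  simp only [List.cons_append, List.nil_append, List.foldl_cons, h1]
  have h2' : pvStep (st ++ ['1'], c) '1' = ((st ++ ['1']) ++ ['1'], c) := by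
    simp [pvStep]
  rw [h2']
  have hcat : (st ++ ['1']) ++ ['1'] = st ++ ['1','1'] := by simp
  rw [hcat, h3]

theorem pvReduce_eq_fold (r : List Char) :
    pvReduce r = (r.foldl pvStep ([], 0)).1 := by
  induction r using pvReduce.induct
  next r i hi =>
    have hi' : PySem.Chars.find r ['1','1','0'] = -1 := hi
    rw [pvReduce, dif_pos hi']
    have hfree : ¬ ['1','1','0'] <:+: r := (PySem.Chars.find_eq_neg_one_iff r _).1 hi'
    rw [pvStep_free_id r [] 0 (by simpa using hfree)]
    simp
  next r i hi ih =>
    have hi' : ¬ PySem.Chars.find r ['1','1','0'] = -1 := hi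
    rw [pvReduce, dif_neg hi']
    set fi := PySem.Chars.find r ['1','1','0'] with hfi
    have h0 : (0:Int) ≤ fi := by have := PySem.Chars.neg_one_le_find r ['1','1','0']; omega
    have hsp := (PySem.Chars.find_spec (s := r) (sub := ['1','1','0']) h0).1
    obtain ⟨t, ht⟩ := hsp
    have ht' : t = r.drop (fi.toNat + 3) := by
      have h3 : List.drop 3 (List.drop fi.toNat r) = List.drop 3 (['1','1','0'] ++ t) := by rw [ht]
      simpa [List.drop_drop, Nat.add_comm] using h3.symm
    have hdec : r = r.take fi.toNat ++ (['1','1','0'] ++ t) := by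
      conv_lhs => rw [← List.take_append_drop fi.toNat r]
      rw [ht]
    have hsl1 : PySem.List.slice r none (some fi) = r.take fi.toNat := PySem.List.slice_to r h0
    have hsl2 : PySem.List.slice r (some (fi + 3)) none = t := by
      rw [PySem.List.slice_from r (show (0:Int) ≤ fi + 3 by omega), ht']
      congr 1
      omega
    rw [hsl1, hsl2] at ih ⊢
    rw [ih]
    conv_rhs => rw [hdec]
    rw [List.foldl_append, List.foldl_append, pvStep_110]
    exact pvStep_fst_indep t _ _

theorem pvGo_miss (s : List Char) (k : Nat)
    (h : ∀ j ≤ k, ¬ (['0'] <+: s.drop j)) : PySem.Chars.rfind.go s ['0'] k = -1 := by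
  induction k with
  | zero =>
    simp only [PySem.Chars.rfind.go]
    rw [if_neg]
    intro hp
    exact h 0 (le_refl 0) (by simpa using List.isPrefixOf_iff_prefix.1 hp)
  | succ k ih =>
    simp only [PySem.Chars.rfind.go]
    rw [if_neg, ih (fun j hj => h j (by omega))]
    intro hp
    exact h (k+1) (le_refl _) (List.isPrefixOf_iff_prefix.1 hp)

theorem pvGo_hit (s : List Char) (j k : Nat) (hjk : j ≤ k)
    (hp : ['0'] <+: s.drop j) (hmax : ∀ j', j < j' → j' ≤ k → ¬ (['0'] <+: s.drop j')) :
    PySem.Chars.rfind.go s ['0'] k = j := by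
  induction k with
  | zero =>
    have hj0 : j = 0 := by omega
    subst hj0
    simp only [PySem.Chars.rfind.go]
    rw [if_pos (List.isPrefixOf_iff_prefix.2 (by simpa using hp))]
    simp
  | succ k ih =>
    simp only [PySem.Chars.rfind.go]
    by_cases hj : j = k + 1
    · subst hj
      rw [if_pos (List.isPrefixOf_iff_prefix.2 hp)]
    · rw [if_neg, ih (by omega) (fun j' h1 h2 => hmax j' h1 (by omega))]
      intro hip
      exact hmax (k+1) (by omega) (le_refl _) (List.isPrefixOf_iff_prefix.1 hip)

theorem pvRfind_zero (r : List Char) :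
    PySem.Chars.rfind r ['0']
      = (r.length : Int) - 1 - ((r.reverse.takeWhile (fun c => c ≠ '0')).length : Int) := by
  have hud : r.reverse.takeWhile (fun c => c ≠ '0') ++ r.reverse.dropWhile (fun c => c ≠ '0') = r.reverse :=
    List.takeWhile_append_dropWhile
  set u := r.reverse.takeWhile (fun c => c ≠ '0') with hu
  have hufree : ∀ c ∈ u, c ≠ '0' := by
    intro c hc
    simpa using List.mem_takeWhile_imp hc
  rcases hcase : r.reverse.dropWhile (fun c => (c ≠ '0' : Bool)) with _ | ⟨a, v⟩
  · -- no '0' anywhere in r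
    have hur : u = r.reverse := by rw [← hud, hcase, List.append_nil]
    have hlen : u.length = r.length := by rw [hur, List.length_reverse]
    rw [PySem.Chars.rfind]
    rw [pvGo_miss r r.length (fun j _ hp => ?_)]
    · rw [hlen]; ring
    · obtain ⟨t, ht⟩ := hp
      have hm : '0' ∈ r := List.mem_of_mem_drop (l := r) (by rw [← ht]; simp)
      have hmu : '0' ∈ u := by rw [hur]; simpa using hm
      exact hufree '0' hmu rfl
  · -- the '0'-free suffix of r has length u.length; last '0' at index v.length
    have ha : a = '0' := by
      have hne : r.reverse.dropWhile (fun c => (c ≠ '0' : Bool)) ≠ [] := by rw [hcase]; simp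
      have hh := List.head_dropWhile_not (fun c => (c ≠ '0' : Bool)) hne
      simp only [hcase, List.head_cons] at hh
      simpa using hh
    have hrev : r.reverse = u ++ '0' :: v := by rw [← hud, hcase, ha]
    have hr : r = v.reverse ++ '0' :: u.reverse := by
      have := congrArg List.reverse hrev
      simpa [List.reverse_append] using this
    have hlen : r.length = u.length + 1 + v.length := by
      rw [hr]; simp; omega
    have hdropj : r.drop v.length = '0' :: u.reverse := by
      conv_lhs => rw [hr, show v.length = v.reverse.length by simp]
      exact List.drop_left
    have hdropj1 : r.drop (v.length + 1) = u.reverse := by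
      have hr2 : r = (v.reverse ++ ['0']) ++ u.reverse := by rw [hr]; simp
      conv_lhs => rw [hr2, show v.length + 1 = (v.reverse ++ ['0']).length by simp]
      exact List.drop_left
    rw [PySem.Chars.rfind]
    rw [pvGo_hit r v.length r.length (by omega) (by rw [hdropj]; exact ⟨u.reverse, rfl⟩)
      (fun j' h1 h2 hp => ?_)]
    · omega
    · obtain ⟨t, ht⟩ := hp
      have h0mem : '0' ∈ r.drop j' := by rw [← ht]; simp
      have hmem : '0' ∈ u.reverse := by
        rw [← hdropj1]
        have heq : r.drop j' = (r.drop (v.length + 1)).drop (j' - (v.length + 1)) := by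
          rw [List.drop_drop]; congr 1; omega
        rw [heq] at h0mem
        exact List.mem_of_mem_drop h0mem
      exact hufree '0' (by simpa using hmem) rfl

theorem pvScan_miss (l : List Char) (stack : List Char) (ooz : Int) (n : Int)
    (h : ∀ c ∈ l, c ≠ '0') :
    pvScan stack ooz (PySem.List.enumerate l n) = PySem.List.pyRepeat ['1','1','0'] ooz ++ stack := by
  induction l generalizing n with
  | nil => simp [PySem.List.enumerate_nil, pvScan]
  | cons c l ih =>
    rw [PySem.List.enumerate_cons, pvScan]
    rw [if_neg (h c (by simp))]
    exact ih _ (fun c hc => h c (by simp [hc]))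

theorem pvScan_hit (l1 l2 : List Char) (stack : List Char) (ooz : Int) (n : Int)
    (h : ∀ c ∈ l1, c ≠ '0') :
    pvScan stack ooz (PySem.List.enumerate (l1 ++ '0' :: l2) n)
      = PySem.List.slice stack none (some ((stack.length : Int) - (n + l1.length))) ++
        PySem.List.pyRepeat ['1','1','0'] ooz ++
        PySem.List.slice stack (some ((stack.length : Int) - (n + l1.length))) none := by
  induction l1 generalizing n with
  | nil =>
    rw [List.nil_append, PySem.List.enumerate_cons, pvScan, if_pos rfl]
    norm_num
  | cons c l1 ih =>
    rw [List.cons_append, PySem.List.enumerate_cons, pvScan]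
    rw [if_neg (h c (by simp))]
    rw [ih (n + 1) (fun c hc => h c (by simp [hc]))]
    have : (n + 1) + (l1.length : Int) = n + (l1.length + 1 : Int) := by ring
    simp only [List.length_cons]
    push_cast
    rw [show (n + 1) + (l1.length : Int) = n + ((l1.length : Int) + 1) by ring]

theorem pvOne_eq (e : List Char) : pvAOne e = pvBOne e := by
  by_cases h3 : 3 ≤ e.length
  · rw [pvAOne, if_pos h3, pvBOne, if_neg (show ¬ e.length < 3 by omega)]
    simp only [pvReduce_eq_fold]
    have hlen := pvStep_len e [] 0
    simp only [List.length_nil] at hlen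
    set P := e.foldl pvStep ([], 0) with hP
    have hooz : PySem.Int.floordiv ((e.length : Int) - (P.1.length : Int)) 3 = P.2 := by
      rw [show (e.length : Int) - (P.1.length : Int) = 3 * P.2 by omega]
      simp [PySem.Int.floordiv]
    rw [hooz, pvRfind_zero]
    set t := (P.1.reverse.takeWhile (fun c => c ≠ '0')).length with htw
    have htle : t ≤ P.1.length := by
      have h := (List.takeWhile_sublist (l := P.1.reverse) (fun c => (c ≠ '0' : Bool))).length_le
      rw [List.length_reverse] at h
      omega
    have hj1 : (P.1.length : Int) - 1 - (t : Int) + 1 = ((P.1.length - t : Nat) : Int) := by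
      omega
    rw [hj1]
    have hud := List.takeWhile_append_dropWhile (p := fun c => (c ≠ '0' : Bool)) (l := P.1.reverse)
    by_cases hP1 : P.1 = []
    · rw [if_neg (by simp [hP1])]
      simp [hP1, PySem.List.slice]
    · rw [if_pos hP1]
      rcases hcase : P.1.reverse.dropWhile (fun c => (c ≠ '0' : Bool)) with _ | ⟨a, v⟩
      · -- no '0' in the stack
        have hur := hud
        rw [hcase, List.append_nil] at hur
        have htlen : t = P.1.length := by rw [htw, hur]; simp
        rw [pvScan_miss _ _ _ _ (fun c hc => by
          have hmem : c ∈ P.1.reverse := by simpa using hc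
          rw [← hur] at hmem
          simpa using List.mem_takeWhile_imp hmem)]
        rw [show P.1.length - t = 0 by omega]
        rw [PySem.List.slice_to _ (by norm_num), PySem.List.slice_from _ (by norm_num)]
        simp
      · -- last '0' of the stack at position P.1.length - t - 1
        have ha : a = '0' := by
          have hne : P.1.reverse.dropWhile (fun c => (c ≠ '0' : Bool)) ≠ [] := by rw [hcase]; simp
          have hh := List.head_dropWhile_not (fun c => (c ≠ '0' : Bool)) hne
          simp only [hcase, List.head_cons] at hh
          simpa using hh
        have hrev := hud
        rw [hcase, ha] at hrev
        rw [← hrev, pvScan_hit _ _ _ _ _ (fun c hc => by simpa using List.mem_takeWhile_imp hc)]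
        have hl2 := congrArg List.length hrev
        rw [List.length_reverse, List.length_append, List.length_cons] at hl2
        rw [← htw] at hl2 ⊢
        rw [show (0 : Int) + (t : Int) = (t : Int) by ring]
        rw [show (P.1.length : Int) - (t : Int) = ((P.1.length - t : Nat) : Int) by omega]
  · rw [pvAOne, if_neg h3, pvBOne, if_pos (show e.length < 3 by omega)]

-- ===== VERDICT (by name: the statement is the Claim_ definition above) =====
theorem solution_spec : Claim_equal_solution := by
  intro s _
  unfold Spec_solution solution solution_alt
  induction s using List.reverseRecOn with
  | nil => rfl
  | append_singleton s e ih => simp [List.foldl_append, pvOne_eq]
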